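-- pv_equiv track=rewrite | github.com/fishwithwater/fiction_console_reader | util.py | format_catalog
-- ===== SOURCE A (Python) =====
-- def format_catalog(current_page_chapter_list, limit):
--     res_str = ''
--     maxlen = max(len(x['title']) for x in current_page_chapter_list)
--     for i in range(limit):
--         if i % 3 == 0 and i != 0:
--             res_str += '\n'
--         res_str += ('{0:{1}<' + str(maxlen) + '}\t').format(current_page_chapter_list[i]['title'], chr(12288))
--     return res_str
-- ===== SOURCE B (Python) =====
-- def format_catalog(current_page_chapter_list, limit):
--     maxlen = max(len(x['title']) for x in current_page_chapter_list)
--     cells = [('{0:{1}<' + str(maxlen) + '}\t').format(current_page_chapter_list[i]['title'], chr(12288))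
--              for i in range(limit)]
--     return '\n'.join(''.join(cells[r:r + 3]) for r in range(0, limit, 3))
-- ===== Notes on version B (the rewrite author's own statement) =====
-- stated objective: alternative
-- what changed: A interleaves formatting and newline insertion in one accumulator loop with an i%3 branch; B first builds the list of formatted cells, then regroups them into rows of three and joins the rows with newlines.
import Mathlib
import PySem

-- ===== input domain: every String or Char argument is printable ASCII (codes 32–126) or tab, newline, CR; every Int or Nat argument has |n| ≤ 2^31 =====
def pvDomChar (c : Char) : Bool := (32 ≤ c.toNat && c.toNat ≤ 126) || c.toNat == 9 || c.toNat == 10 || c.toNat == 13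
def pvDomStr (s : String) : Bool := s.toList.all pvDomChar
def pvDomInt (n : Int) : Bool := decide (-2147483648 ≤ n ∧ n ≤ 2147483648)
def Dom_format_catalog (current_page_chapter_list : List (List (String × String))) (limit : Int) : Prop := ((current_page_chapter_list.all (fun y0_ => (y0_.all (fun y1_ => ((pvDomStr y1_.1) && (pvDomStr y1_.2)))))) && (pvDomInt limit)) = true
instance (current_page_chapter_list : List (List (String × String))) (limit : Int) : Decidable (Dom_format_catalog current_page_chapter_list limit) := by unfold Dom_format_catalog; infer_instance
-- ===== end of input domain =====

-- B replaces A's running modulo-branch accumulation with a build-then-chunk pass: format all cells first, then regroup them into rows of three and join the rows; alternative decomposition, same cost.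


-- ===== PORT A =====
-- x['title'] on an association-list dict: first matching key (Pre_ guarantees presence)
def pvTitle (d : List (String × String)) : String :=
  ((d.find? (fun p => p.1 == "title")).map Prod.snd).getD ""

-- ('{0:{1}<' + str(m) + '}\t').format(s, chr(12288)): left-align s, pad on the right with
-- U+3000 up to width m, then append a tab (exact: format never truncates, pads only if shorter)
def pvCell (m : Nat) (s : String) : String :=
  String.ofList (s.toList ++ List.replicate (m - s.toList.length) (Char.ofNat 12288) ++ ['\t'])

-- max(len(x['title']) for x in lst): fold with the first element as initial value (Pre_ gives lst ≠ [])
def pvMaxLen (lst : List (List (String × String))) : Nat :=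
  match lst.map (fun x => (pvTitle x).toList.length) with
  | [] => 0
  | h :: t => t.foldl max h

def format_catalog (current_page_chapter_list : List (List (String × String))) (limit : Int) : String :=
  let maxlen := pvMaxLen current_page_chapter_list
  (PySem.List.pyRange 0 limit 1).foldl
    (fun res_str i =>
      (if PySem.Int.mod i 3 == 0 && !(i == 0) then res_str ++ "\n" else res_str)
        ++ pvCell maxlen (pvTitle (PySem.List.pyGetD current_page_chapter_list i [])))
    ""

-- ===== PORT B =====
def format_catalog_alt (current_page_chapter_list : List (List (String × String))) (limit : Int) : String :=
  let maxlen := pvMaxLen current_page_chapter_list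
  let cells := (PySem.List.pyRange 0 limit 1).map
    (fun i => pvCell maxlen (pvTitle (PySem.List.pyGetD current_page_chapter_list i [])))
  PySem.Str.join "\n" ((PySem.List.pyRange 0 limit 3).map
    (fun r => PySem.Str.join "" (PySem.List.slice cells (some r) (some (r + 3)))))

-- ===== PRECONDITION & SPEC =====
-- Pre_ excludes exactly the inputs where Python A raises: an empty list (ValueError from max),
-- limit exceeding the list length (IndexError), or an element without a 'title' key (KeyError).
def Pre_format_catalog (current_page_chapter_list : List (List (String × String))) (limit : Int) : Prop :=
  current_page_chapter_list ≠ [] ∧ limit ≤ (current_page_chapter_list.length : Int) ∧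
  ∀ x ∈ current_page_chapter_list, (x.find? (fun p => p.1 == "title")).isSome = true
instance (current_page_chapter_list : List (List (String × String))) (limit : Int) : Decidable (Pre_format_catalog current_page_chapter_list limit) := by unfold Pre_format_catalog; infer_instance

def pvWitness_format_catalog : (List (List (String × String))) × Int := ([[("title", "ab")], [("title", "c")]], 2)

def Spec_format_catalog (current_page_chapter_list : List (List (String × String))) (limit : Int) (out : String) : Prop := out = format_catalog_alt current_page_chapter_list limit
instance (current_page_chapter_list : List (List (String × String))) (limit : Int) (out : String) : Decidable (Spec_format_catalog current_page_chapter_list limit out) := by unfold Spec_format_catalog; infer_instance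

-- ===== CLAIM (what is proved, stated in full; the proofs are below) =====
def Claim_equal_format_catalog : Prop := ∀ (current_page_chapter_list : List (List (String × String))) (limit : Int), Dom_format_catalog current_page_chapter_list limit → Pre_format_catalog current_page_chapter_list limit → Spec_format_catalog current_page_chapter_list limit (format_catalog current_page_chapter_list limit)

-- ===== LEMMAS AND PROOFS =====

-- A's loop body as a right recursion over the index list: conditional separator, then the cell
def pvCatSep (f : Int → String) : List Int → String
  | [] => ""
  | i :: is => (if PySem.Int.mod i 3 == 0 && !(i == 0) then "\n" else "") ++ f i ++ pvCatSep f is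

-- plain concatenation of cells (what ''.join of a row computes)
def pvCat (f : Int → String) : List Int → String
  | [] => ""
  | i :: is => f i ++ pvCat f is

lemma pvCatSep_append (f : Int → String) (l₁ l₂ : List Int) :
    pvCatSep f (l₁ ++ l₂) = pvCatSep f l₁ ++ pvCatSep f l₂ := by
  induction l₁ with
  | nil => simp [pvCatSep]
  | cons a t ih => simp [pvCatSep, ih, String.append_assoc]

lemma pvFoldl_eq_catSep (f : Int → String) (l : List Int) (acc : String) :
    l.foldl (fun a i => (if PySem.Int.mod i 3 == 0 && !(i == 0) then a ++ "\n" else a) ++ f i) acc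
      = acc ++ pvCatSep f l := by
  induction l generalizing acc with
  | nil => simp [pvCatSep]
  | cons a t ih =>
      simp only [List.foldl_cons, ih, pvCatSep]
      split <;> simp [String.append_assoc]

lemma pvIc (sep x y : List Char) (t : List (List Char)) :
    sep.intercalate (x :: y :: t) = x ++ sep ++ sep.intercalate (y :: t) := by
  simp [List.intercalate, List.intersperse]

lemma pvJoin_empty_eq_cat (f : Int → String) (l : List Int) :
    PySem.Str.join "" (l.map f) = pvCat f l := by
  induction l with
  | nil => rfl
  | cons a t ih =>
      cases t with
      | nil => simp [pvCat, PySem.Str.join, PySem.Chars.join, List.intercalate]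
      | cons b t' =>
          simp only [List.map_cons, PySem.Str.join, PySem.Chars.join] at ih ⊢
          rw [pvIc]
          simp only [pvCat] at ih ⊢
          rw [← ih, String.ofList_append, String.ofList_append]
          simp [String.ofList_toList]

lemma pvJoin_cons (x : String) (xs : List String) :
    PySem.Str.join "\n" (x :: xs) =
      x ++ (if xs.isEmpty then "" else "\n" ++ PySem.Str.join "\n" xs) := by
  cases xs with
  | nil => simp [PySem.Str.join, PySem.Chars.join, List.intercalate]
  | cons b t =>
      simp only [PySem.Str.join, PySem.Chars.join, List.map_cons, List.isEmpty_cons]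
      rw [pvIc, String.ofList_append, String.ofList_append]
      simp [String.ofList_toList, String.append_assoc]

lemma pvDropRange (a limit : Int) (k : Nat) :
    (PySem.List.pyRange a limit 1).drop k = PySem.List.pyRange (a + k) limit 1 := by
  induction k generalizing a with
  | zero => simp
  | succ k ih =>
      by_cases h : a < limit
      · rw [PySem.List.pyRange_one_cons h]
        simpa [← Int.add_assoc, Int.add_comm, Int.add_left_comm] using ih (a + 1)
      · rw [PySem.List.pyRange_one_eq_nil (by omega), PySem.List.pyRange_one_eq_nil (by omega)]
        simp

lemma pvRange3_nil (r limit : Int) (h : limit ≤ r) :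
    PySem.List.pyRange r limit 3 = [] := by
  rw [PySem.List.pyRange_of_pos _ _ (by omega)]
  simp [show ¬ r < limit by omega]

lemma pvRange3_cons (r limit : Int) (h : r < limit) :
    PySem.List.pyRange r limit 3 = r :: PySem.List.pyRange (r + 3) limit 3 := by
  rw [PySem.List.pyRange_of_pos _ _ (by omega), PySem.List.pyRange_of_pos _ _ (by omega)]
  have hn : (if r < limit then ((limit - r + 3 - 1) / 3).toNat else 0)
      = (if r + 3 < limit then ((limit - (r + 3) + 3 - 1) / 3).toNat else 0) + 1 := by
    by_cases h2 : r + 3 < limit <;> simp [h, h2] <;> omega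
  rw [hn, List.range_succ_eq_map]
  simp [List.map_map, Function.comp_def]
  intro a _
  ring

lemma pvSep0 (r : Int) (j : Nat) (hr : r = 3 * (j : Int)) :
    (if PySem.Int.mod r 3 == 0 && !(r == 0) then ("\n" : String) else "") = (if r = 0 then "" else "\n") := by
  have hm : PySem.Int.mod r 3 = 0 := by rw [PySem.Int.mod_eq_emod_of_pos (by omega)]; omega
  rw [hm]
  by_cases h0 : r = 0 <;> simp [h0]

lemma pvSepNe (i : Int) (h : i % 3 ≠ 0) :
    (if PySem.Int.mod i 3 == 0 && !(i == 0) then ("\n" : String) else "") = "" := by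
  have hm : PySem.Int.mod i 3 = i % 3 := PySem.Int.mod_eq_emod_of_pos (by omega)
  rw [hm]
  simp [h]

lemma pvRangeChunk (r : Int) :
    PySem.List.pyRange r (r + 3) 1 = [r, r + 1, r + 2] := by
  rw [PySem.List.pyRange_one_cons (by omega), PySem.List.pyRange_one_cons (by omega),
      PySem.List.pyRange_one_cons (by omega), PySem.List.pyRange_one_eq_nil (by omega)]
  simp
  omega

-- the core regrouping identity, by strong induction in steps of three
lemma pvCore (f : Int → String) :
    ∀ n : Nat, ∀ r limit : Int, ∀ j : Nat, (limit - r).toNat = n → r = 3 * (j : Int) → r < limit →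
      pvCatSep f (PySem.List.pyRange r limit 1)
        = (if r = 0 then "" else "\n")
          ++ PySem.Str.join "\n" ((PySem.List.pyRange r limit 3).map
               (fun q => pvCat f ((PySem.List.pyRange q limit 1).take 3))) := by
  intro n
  induction n using Nat.strong_induction_on with
  | _ n ih =>
    intro r limit j hn hr hlt
    have h0 : 0 ≤ r := by omega
    by_cases hB : r + 3 < limit
    · -- a full chunk of three, followed by more rows
      have hsplit : PySem.List.pyRange r limit 1
          = [r, r + 1, r + 2] ++ PySem.List.pyRange (r + 3) limit 1 := by
        rw [PySem.List.pyRange_one_append r (r + 3) limit (by omega) (by omega), pvRangeChunk r]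
      have hih := ih ((limit - (r + 3)).toNat) (by omega) (r + 3) limit (j + 1) rfl (by push_cast; omega) hB
      rw [hsplit, pvCatSep_append, hih]
      rw [pvRange3_cons r limit hlt, List.map_cons, pvJoin_cons]
      rw [pvRange3_cons (r + 3) limit hB]
      have htake : (PySem.List.pyRange r limit 1).take 3 = [r, r + 1, r + 2] := by
        rw [hsplit]; rfl
      simp only [htake, List.map_cons, List.isEmpty_cons]
      rw [pvCatSep, pvCatSep, pvCatSep, pvCatSep]
      rw [pvSep0 r j hr, pvSepNe (r + 1) (by omega), pvSepNe (r + 2) (by omega)]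
      rw [if_neg (by omega : ¬ r + 3 = 0)]
      simp [pvCat, String.append_assoc]
    · -- the last (possibly partial) chunk: one row only
      rw [pvRange3_cons r limit hlt, pvRange3_nil (r + 3) limit (by omega), List.map_cons,
          List.map_nil, pvJoin_cons]
      have htake : (PySem.List.pyRange r limit 1).take 3 = PySem.List.pyRange r limit 1 := by
        apply List.take_of_length_le
        rw [PySem.List.length_pyRange_one]; omega
      simp only [htake, List.isEmpty_nil]
      have hcases : limit = r + 1 ∨ limit = r + 2 ∨ limit = r + 3 := by omega
      rcases hcases with h | h | h <;> subst h
      · rw [PySem.List.pyRange_one_cons (by omega), PySem.List.pyRange_one_eq_nil (by omega)]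
        rw [pvCatSep, pvCatSep, pvSep0 r j hr]
        simp [pvCat]
      · rw [PySem.List.pyRange_one_cons (by omega), PySem.List.pyRange_one_cons (by omega),
            PySem.List.pyRange_one_eq_nil (by omega)]
        rw [pvCatSep, pvCatSep, pvCatSep, pvSep0 r j hr, pvSepNe (r + 1) (by omega)]
        simp [pvCat, String.append_assoc]
      · rw [pvRangeChunk r]
        rw [pvCatSep, pvCatSep, pvCatSep, pvCatSep, pvSep0 r j hr, pvSepNe (r + 1) (by omega),
            pvSepNe (r + 2) (by omega)]
        simp [pvCat, String.append_assoc]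

-- B's rows, rewritten from slices of the cell list to takes of index ranges
lemma pvRow_eq (f : Int → String) (limit : Int) (r : Int) (hr0 : 0 ≤ r) :
    PySem.Str.join "" (PySem.List.slice ((PySem.List.pyRange 0 limit 1).map f) (some r) (some (r + 3)))
      = pvCat f ((PySem.List.pyRange r limit 1).take 3) := by
  rw [PySem.List.slice_toNat _ hr0 (by omega)]
  have h3 : (r + 3).toNat - r.toNat = 3 := by omega
  rw [h3, ← List.map_drop, pvDropRange 0 limit r.toNat,
      show (0 : Int) + (r.toNat : Int) = r by omega, ← List.map_take, pvJoin_empty_eq_cat]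

-- ===== VERDICT (by name: the statement is the Claim_ definition above) =====
theorem format_catalog_spec : Claim_equal_format_catalog := by
  intro lst limit _ _
  unfold Spec_format_catalog
  dsimp only [format_catalog, format_catalog_alt]
  rw [pvFoldl_eq_catSep, String.empty_append]
  rw [List.map_congr_left (fun r hrm => pvRow_eq
        (fun i => pvCell (pvMaxLen lst) (pvTitle (PySem.List.pyGetD lst i []))) limit r
        (by rcases (PySem.List.mem_pyRange_iff_of_pos (by omega) r).1 hrm with ⟨h1, _⟩; omega))]
  by_cases hpos : 0 < limit
  · rw [pvCore _ (limit - 0).toNat 0 limit 0 (by omega) (by norm_num) hpos]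
    simp
  · rw [PySem.List.pyRange_one_eq_nil (by omega), pvRange3_nil 0 limit (by omega)]
    rfl
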